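-- pv_equiv track=rewrite | github.com/fkhalid/genonets | genonets/interface.py | _process_blocks
-- ===== SOURCE A (Python) =====
-- def _process_blocks(num_repertoires, num_processes):
--     # If there are enough processes to process all repertoires
--     # in parallel,
--     if num_repertoires <= num_processes:
--         # Only one iteration is required
--         indices = [1]
--     else:
--         # Calculate the number of iteration that consume all
--         # processes
--         num_full_iters = num_repertoires // num_processes
--
--         # Calculate the increment required in the last iteration
--         incr_last = num_repertoires % num_processes
--
--         # Create a list of increment values per iteration
--         index_incrs = [num_processes for _ in range(num_full_iters)] \
--             if num_full_iters != 0 else []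
--
--         # If required, add the last increment
--         if incr_last != 0:
--             index_incrs.append(incr_last)
--
--         # Initialize the list of indices
--         indices = [1]
--
--         # Indices from index 1 onwards are calculated using prefix sum
--         # of the increment list
--         for i in range(0, len(index_incrs) - 1):
--             indices.append(index_incrs[i] + indices[i])
--
--     return indices
-- ===== SOURCE B (Python) =====
-- def _process_blocks(num_repertoires, num_processes):
--     # A single round of processes covers everything: one block.
--     if num_repertoires <= num_processes:
--         return [1]
--     # Number of blocks = ceiling of repertoires / processes.
--     num_blocks = -(-num_repertoires // num_processes)
--     return [1 + i * num_processes for i in range(num_blocks)]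
-- ===== Notes on version B (the rewrite author's own statement) =====
-- stated objective: simpler
-- what changed: Replaces A's increment-list construction plus prefix-sum loop by a ceiling division giving the block count and a direct closed-form emission of the indices; Pre_ excludes non-positive process counts reached by the division branch, where a process count makes no sense (A raises ZeroDivisionError at 0 and its [1] for negative counts is an accident of range() over a negative quotient).
-- outside the precondition, e.g. on _process_blocks(5, -2): A returns [1], B returns []; on _process_blocks(5, 0): A raises ZeroDivisionError, B raises ZeroDivisionError
import Mathlib
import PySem

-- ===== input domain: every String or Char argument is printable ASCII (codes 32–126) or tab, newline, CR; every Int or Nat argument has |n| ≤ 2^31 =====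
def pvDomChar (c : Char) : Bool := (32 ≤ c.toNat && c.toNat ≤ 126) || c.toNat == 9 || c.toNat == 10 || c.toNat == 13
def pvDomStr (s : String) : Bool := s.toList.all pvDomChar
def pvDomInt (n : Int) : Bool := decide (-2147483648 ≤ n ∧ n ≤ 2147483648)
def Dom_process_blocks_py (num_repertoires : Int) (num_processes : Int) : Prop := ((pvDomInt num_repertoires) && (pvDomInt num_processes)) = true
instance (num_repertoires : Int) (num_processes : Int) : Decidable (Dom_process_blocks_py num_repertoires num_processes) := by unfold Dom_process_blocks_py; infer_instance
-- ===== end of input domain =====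

-- B replaces A's increment-list + prefix-sum loop by a ceiling division and a
-- closed-form emission of the indices (objective: simpler).

-- ===== PORT A =====
def process_blocks_py (num_repertoires : Int) (num_processes : Int) : List Int :=
  if num_repertoires ≤ num_processes then [1]
  else
    let num_full_iters := PySem.Int.floordiv num_repertoires num_processes
    let incr_last := PySem.Int.mod num_repertoires num_processes
    -- [num_processes for _ in range(num_full_iters)]: Python's range of a
    -- negative int is empty, exactly like List.range (·.toNat)
    let index_incrs :=
      if num_full_iters ≠ 0 then
        (List.range num_full_iters.toNat).map (fun _ => num_processes)
      else []
    let index_incrs :=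
      if incr_last ≠ 0 then index_incrs ++ [incr_last] else index_incrs
    (PySem.List.pyRange 0 ((index_incrs.length : Int) - 1) 1).foldl
      (fun indices i =>
        indices ++ [PySem.List.pyGetD index_incrs i 0 + PySem.List.pyGetD indices i 0])
      [1]

-- ===== PORT B =====
def process_blocks_py_alt (num_repertoires : Int) (num_processes : Int) : List Int :=
  if num_repertoires ≤ num_processes then [1]
  else
    let num_blocks := -(PySem.Int.floordiv (-num_repertoires) num_processes)
    (List.range num_blocks.toNat).map (fun (i : Nat) => 1 + (i : Int) * num_processes)

-- ===== PRECONDITION & SPEC =====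
-- Pre_ excludes non-positive process counts reached by the division branch, which
-- are outside the function's natural domain: at num_processes = 0 A (and B) raise
-- ZeroDivisionError, and for negative counts A's [1] is an accident of range()
-- over a negative quotient (B naturally returns []).
def Pre_process_blocks_py (num_repertoires : Int) (num_processes : Int) : Prop :=
  num_repertoires ≤ num_processes ∨ 1 ≤ num_processes
instance (num_repertoires : Int) (num_processes : Int) : Decidable (Pre_process_blocks_py num_repertoires num_processes) := by unfold Pre_process_blocks_py; infer_instance
def pvWitness_process_blocks_py : Int × Int := (7, 3)
def Spec_process_blocks_py (num_repertoires : Int) (num_processes : Int) (out : List Int) : Prop := out = process_blocks_py_alt num_repertoires num_processes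
instance (num_repertoires : Int) (num_processes : Int) (out : List Int) : Decidable (Spec_process_blocks_py num_repertoires num_processes out) := by unfold Spec_process_blocks_py; infer_instance

-- ===== CLAIM (what is proved, stated in full; the proofs are below) =====
def Claim_equal_process_blocks_py : Prop := ∀ (num_repertoires : Int) (num_processes : Int), Dom_process_blocks_py num_repertoires num_processes → Pre_process_blocks_py num_repertoires num_processes → Spec_process_blocks_py num_repertoires num_processes (process_blocks_py num_repertoires num_processes)

-- ===== LEMMAS AND PROOFS =====

-- The prefix-sum loop, run n times over a list whose first n entries are all
-- `np`, produces exactly the closed-form index list of length n+1.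
theorem pb_loop_closed (np : Int) (incrs : List Int) (n : Nat)
    (h : ∀ i : Nat, i < n → PySem.List.pyGetD incrs (i : Int) 0 = np) :
    (List.range n).foldl
      (fun indices (j : Nat) =>
        indices ++ [PySem.List.pyGetD incrs (j : Int) 0 + PySem.List.pyGetD indices (j : Int) 0])
      [1]
    = (List.range (n + 1)).map (fun (i : Nat) => 1 + (i : Int) * np) := by
  induction n with
  | zero => simp
  | succ m ih =>
    rw [List.range_succ, List.foldl_append]
    rw [ih (fun i hi => h i (by omega))]
    rw [List.foldl_cons, List.foldl_nil]
    rw [h m (by omega)]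
    rw [PySem.List.pyGetD_of_nonneg _ _ (by positivity)]
    rw [Int.toNat_natCast]
    rw [PySem.List.getD_map_range _ _ _ _ (by omega)]
    conv_rhs => rw [List.range_succ, List.map_append]
    congr 1
    simp only [List.map_cons, List.map_nil, List.cons.injEq, and_true]
    push_cast
    ring

theorem process_blocks_py_spec : Claim_equal_process_blocks_py := by
  intro nr np _ hpre
  unfold Spec_process_blocks_py process_blocks_py process_blocks_py_alt
  by_cases hle : nr ≤ np
  · simp [hle]
  · simp only [if_neg hle]
    have hpos : 0 < np := by
      rcases hpre with h | h
      · exact absurd h hle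
      · omega
    set f := PySem.Int.floordiv nr np with hf
    set r := PySem.Int.mod nr np with hr
    have hfr := PySem.Int.floordiv_mul_add_mod nr np
    rw [← hf, ← hr] at hfr
    have hr0 : 0 ≤ r := hr ▸ PySem.Int.mod_nonneg nr hpos
    have hrlt : r < np := hr ▸ PySem.Int.mod_lt nr hpos
    have hf1 : 1 ≤ f := by
      rw [hf, PySem.Int.le_floordiv_iff_mul_le hpos]
      omega
    have hfz : f ≠ 0 := by omega
    -- the ceiling division equals f plus one extra block iff there is a remainder
    have hceil : -(PySem.Int.floordiv (-nr) np) = f + (if r ≠ 0 then 1 else 0) := by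
      rw [PySem.Int.neg_floordiv_neg_eq_iff_of_pos hpos]
      by_cases hrz : r = 0
      · have := mul_pos (by omega : (0:Int) < f) hpos
        simp only [hrz, if_neg (by simp : ¬(0:Int) ≠ 0)]
        constructor <;> nlinarith
      · have hrpos : 0 < r := lt_of_le_of_ne hr0 (Ne.symm hrz)
        simp only [if_pos hrz]
        constructor <;> nlinarith
    simp only [if_pos hfz, hceil]
    set incrs : List Int :=
      (if r ≠ 0 then (List.range f.toNat).map (fun _ => np) ++ [r]
        else (List.range f.toNat).map (fun _ => np)) with hincrs
    have hlen : incrs.length = f.toNat + (if r ≠ 0 then 1 else 0) := by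
      by_cases hrz : r = 0 <;> simp [hincrs, hrz]
    have hconst : ∀ i : Nat, i < incrs.length - 1 →
        PySem.List.pyGetD incrs (i : Int) 0 = np := by
      intro i hi
      have hif : i < f.toNat := by
        rw [hlen] at hi
        by_cases hrz : r = 0 <;> simp [hrz] at hi <;> omega
      rw [PySem.List.pyGetD_of_nonneg _ _ (by positivity), Int.toNat_natCast]
      by_cases hrz : r = 0
      · rw [hincrs, if_neg (by simp [hrz])]
        rw [PySem.List.getD_map_range _ _ _ _ hif]
      · rw [hincrs, if_pos hrz]
        rw [List.getD_append _ _ _ _ (by simpa using hif)]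
        rw [PySem.List.getD_map_range _ _ _ _ hif]
    have hcast : ((incrs.length : Int) - 1 - 0).toNat = incrs.length - 1 := by omega
    rw [PySem.List.pyRange_one, List.foldl_map]
    simp only [zero_add]
    rw [hcast, pb_loop_closed np incrs (incrs.length - 1) hconst]
    have hc : (f + if r ≠ 0 then 1 else 0).toNat = incrs.length - 1 + 1 := by
      rw [hlen]
      by_cases hrz : r = 0 <;> simp [hrz] <;> omega
    rw [hc]
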